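-- pv_equiv track=rewrite | github.com/PaulFilms/pydeveloptools | pydeveloptools/func_system.py | PATH_VALIDATE
-- ===== SOURCE A (Python) =====
-- from typing import List
--
-- def PATH_VALIDATE(path: str) -> str:
--     '''
--     Check and remove invalid characters
--     '''
--     ## ASCII
--     invalids_int: List[int] = [10, 32, 34, 39, 42, 47, 58, 59, 60, 62, 63, 92, 94, 96, 124]
--     invalids: List[str] = [chr(c) for c in invalids_int]
--     #
--     valid_path: str = path
--     for c in invalids:
--         if c in valid_path:
--             valid_path = valid_path.replace(c, str())
--     return valid_path
-- ===== SOURCE B (Python) =====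
-- def PATH_VALIDATE(path: str) -> str:
--     '''
--     Check and remove invalid characters
--     '''
--     INVALID_CODES = frozenset((10, 32, 34, 39, 42, 47, 58, 59, 60, 62, 63, 92, 94, 96, 124))
--     out = []
--     for ch in path:
--         if ord(ch) not in INVALID_CODES:
--             out.append(ch)
--     return ''.join(out)
-- ===== Notes on version B (the rewrite author's own statement) =====
-- stated objective: idiomatic
-- what changed: One explicit pass over the input accumulating kept characters whose code point is outside a precomputed frozenset of invalid codes, instead of 15 successive full-string replace() passes (one per blacklisted character).
import Mathlib
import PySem

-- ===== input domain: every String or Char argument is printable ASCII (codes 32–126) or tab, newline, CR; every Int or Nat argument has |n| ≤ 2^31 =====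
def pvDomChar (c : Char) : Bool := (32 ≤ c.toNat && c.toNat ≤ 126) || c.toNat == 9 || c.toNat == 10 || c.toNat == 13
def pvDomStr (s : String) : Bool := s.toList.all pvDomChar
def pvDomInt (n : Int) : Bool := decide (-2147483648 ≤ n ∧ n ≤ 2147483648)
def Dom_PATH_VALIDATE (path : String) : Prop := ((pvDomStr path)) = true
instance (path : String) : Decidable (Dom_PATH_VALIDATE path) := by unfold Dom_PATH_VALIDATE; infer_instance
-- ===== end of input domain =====

-- B replaces A's 15 successive full-string replace() passes by one explicit loop over the
-- input, appending to an accumulator each character whose code point is not in a precomputed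
-- frozenset of invalid codes (idiomatic single traversal).


-- ===== PORT A =====
def PATH_VALIDATE (path : String) : String :=
  let invalids_int : List Int := [10, 32, 34, 39, 42, 47, 58, 59, 60, 62, 63, 92, 94, 96, 124]
  let invalids : List String := invalids_int.map (fun c => String.ofList [Char.ofNat c.toNat])
  invalids.foldl
    (fun valid_path c =>
      if PySem.Str.isIn c valid_path then PySem.Str.replace valid_path c "" else valid_path)
    path

-- ===== PORT B =====
-- 'ord(ch) not in INVALID_CODES': membership of the code point in the frozenset of 15 codes
def pvInvalidCode (n : Nat) : Bool :=
  n == 10 || n == 32 || n == 34 || n == 39 || n == 42 || n == 47 || n == 58 || n == 59 ||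
  n == 60 || n == 62 || n == 63 || n == 92 || n == 94 || n == 96 || n == 124

def PATH_VALIDATE_alt (path : String) : String :=
  let out : List Char :=
    path.toList.foldl (fun acc ch => if !(pvInvalidCode ch.toNat) then acc ++ [ch] else acc) []
  String.ofList out

-- ===== PRECONDITION & SPEC =====
def Spec_PATH_VALIDATE (path : String) (out : String) : Prop := out = PATH_VALIDATE_alt path
instance (path : String) (out : String) : Decidable (Spec_PATH_VALIDATE path out) := by unfold Spec_PATH_VALIDATE; infer_instance

-- ===== CLAIM (what is proved, stated in full; the proofs are below) =====
def Claim_equal_PATH_VALIDATE : Prop := ∀ (path : String), Dom_PATH_VALIDATE path → Spec_PATH_VALIDATE path (PATH_VALIDATE path)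

-- ===== LEMMAS AND PROOFS =====

-- replace.go with a single-character pattern and empty replacement is a filter
theorem go_single (a : Char) : ∀ (l : List Char) (fuel : Nat) (acc : List Char),
    l.length ≤ fuel →
    PySem.Chars.replace.go [a] [] fuel l acc = acc.reverse ++ l.filter (fun x => x ≠ a) := by
  intro l
  induction l with
  | nil =>
    intro fuel acc _
    cases fuel <;> simp [PySem.Chars.replace.go]
  | cons c t ih =>
    intro fuel acc h
    cases fuel with
    | zero => simp at h
    | succ f =>
      rw [PySem.Chars.replace.go]
      by_cases hac : a = c
      · subst hac
        simp only [List.isPrefixOf, BEq.rfl, Bool.and_self, if_true, List.length_cons,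
          List.length_nil, List.drop_succ_cons, List.drop_zero, List.reverse_nil,
          List.nil_append]
        rw [ih _ _ (Nat.le_of_succ_le_succ h)]
        simp
      · have hpre : ([a].isPrefixOf (c :: t)) = false := by
          simp [List.isPrefixOf]
          exact hac
        rw [hpre]
        simp only [Bool.false_eq_true, if_false]
        rw [ih _ _ (Nat.le_of_succ_le_succ h)]
        simp [Ne.symm hac]

theorem replace_single (a : Char) (s : List Char) :
    PySem.Chars.replace s [a] [] = s.filter (fun x => x ≠ a) := by
  rw [PySem.Chars.replace]
  simp only [List.isEmpty_cons, Bool.false_eq_true, if_false]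
  simpa using go_single a s s.length [] le_rfl

-- a single replace-or-skip step of A is a filter step, whether or not the character occurs
theorem step_filter (a : Char) (s : List Char) :
    (if PySem.Chars.isIn [a] s then PySem.Chars.replace s [a] [] else s)
      = s.filter (fun x => x ≠ a) := by
  by_cases h : PySem.Chars.isIn [a] s = true
  · rw [if_pos h, replace_single]
  · rw [if_neg h]
    have hmem : a ∉ s := by
      intro hmem
      obtain ⟨u, v, huv⟩ := List.mem_iff_append.mp hmem
      exact ((PySem.Chars.isIn_eq_false_iff _ _).mp (Bool.eq_false_iff.mpr h))
        ⟨u, v, by simp [huv]⟩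
    symm
    exact List.filter_eq_self.mpr (fun x hx => by simp; rintro rfl; exact hmem hx)

-- char inequality against a constructed character, as a test on the code point
theorem beq_ofNat_eq (x : Char) (k : Nat) (hk : (Char.ofNat k).toNat = k) :
    (x == Char.ofNat k) = (x.toNat == k) := by
  by_cases h : x = Char.ofNat k
  · subst h; simp [hk]
  · have hn : x.toNat ≠ k := by
      intro hn
      have hv : x.toNat = (Char.ofNat k).toNat := by rw [hk]; exact hn
      exact h (Char.ext (UInt32.toNat_inj.mp hv))
    simp [h, hn]

-- A's whole fold over a blacklist of single characters is one filter by list membership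
theorem fold_str (cs : List Char) : ∀ (s : String),
    (cs.map (fun a => String.ofList [a])).foldl
        (fun valid_path c =>
          if PySem.Str.isIn c valid_path then PySem.Str.replace valid_path c "" else valid_path)
        s
      = String.ofList (s.toList.filter (fun x => !(cs.contains x))) := by
  induction cs with
  | nil =>
    intro s
    simp only [List.map_nil, List.foldl_nil, List.contains_nil, Bool.not_false,
      List.filter_true, String.ofList_toList]
  | cons a cs ih =>
    intro s
    have hstep :
        (if PySem.Str.isIn (String.ofList [a]) s then PySem.Str.replace s (String.ofList [a]) "" else s)
          = String.ofList (s.toList.filter (fun x => x ≠ a)) := by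
      unfold PySem.Str.isIn PySem.Str.replace
      simp only [String.toList_ofList]
      rw [← step_filter a s.toList]
      by_cases hcase : PySem.Chars.isIn [a] s.toList = true
      · simp [hcase]
      · simp [hcase]
    rw [List.map_cons, List.foldl_cons, hstep, ih]
    simp only [String.toList_ofList, List.filter_filter]
    congr 1
    apply List.filter_congr
    intro x _
    by_cases hxa : x = a <;> simp [hxa]

set_option maxHeartbeats 1000000 in
-- ===== VERDICT (by name: the statement is the Claim_ definition above) =====
theorem PATH_VALIDATE_spec : Claim_equal_PATH_VALIDATE := by
  intro path _
  unfold Spec_PATH_VALIDATE PATH_VALIDATE PATH_VALIDATE_alt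
  simp only []
  -- B's append loop is a single filter pass
  rw [PySem.List.foldl_append_if_eq_filter]
  -- rewrite A's mapped blacklist as a char list mapped to singleton strings, then fold it away
  rw [show (([10, 32, 34, 39, 42, 47, 58, 59, 60, 62, 63, 92, 94, 96, 124] : List Int).map
        (fun c => String.ofList [Char.ofNat c.toNat]))
      = (([10, 32, 34, 39, 42, 47, 58, 59, 60, 62, 63, 92, 94, 96, 124] : List Int).map
          (fun c => Char.ofNat c.toNat)).map (fun a => String.ofList [a]) by
    rw [List.map_map]
    rfl]
  rw [fold_str]
  simp only [List.nil_append]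
  congr 1
  apply List.filter_congr
  intro x _
  simp only [show Int.toNat 10 = 10 from rfl, show Int.toNat 32 = 32 from rfl, show Int.toNat 34 = 34 from rfl, show Int.toNat 39 = 39 from rfl, show Int.toNat 42 = 42 from rfl, show Int.toNat 47 = 47 from rfl, show Int.toNat 58 = 58 from rfl, show Int.toNat 59 = 59 from rfl, show Int.toNat 60 = 60 from rfl, show Int.toNat 62 = 62 from rfl, show Int.toNat 63 = 63 from rfl, show Int.toNat 92 = 92 from rfl, show Int.toNat 94 = 94 from rfl, show Int.toNat 96 = 96 from rfl, show Int.toNat 124 = 124 from rfl,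
    List.map_cons, List.map_nil, List.contains_cons, List.contains_nil,
    beq_ofNat_eq x 10 (by decide), beq_ofNat_eq x 32 (by decide), beq_ofNat_eq x 34 (by decide),
    beq_ofNat_eq x 39 (by decide), beq_ofNat_eq x 42 (by decide), beq_ofNat_eq x 47 (by decide),
    beq_ofNat_eq x 58 (by decide), beq_ofNat_eq x 59 (by decide), beq_ofNat_eq x 60 (by decide),
    beq_ofNat_eq x 62 (by decide), beq_ofNat_eq x 63 (by decide), beq_ofNat_eq x 92 (by decide),
    beq_ofNat_eq x 94 (by decide), beq_ofNat_eq x 96 (by decide), beq_ofNat_eq x 124 (by decide),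
    pvInvalidCode, Bool.or_false]
  ac_rfl
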